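-- pv_equiv track=rewrite | github.com/ngsutils/ngsutils | ngsutils/support/localalign.py | _reduce_cigar
-- ===== SOURCE A (Python) =====
-- def _reduce_cigar(cigar):
--     count = 1
--     last = None
--     ret = []
--     for op in cigar:
--         if last and op == last:
--             count += 1
--         elif last:
--             ret.append((count, last.upper()))
--             count = 1
--         last = op
--
--     if last:
--         ret.append((count,last.upper()))
--     return ret
-- ===== SOURCE B (Python) =====
-- def _reduce_cigar(cigar):
--     ret = []
--     i, n = 0, len(cigar)
--     while i < n:
--         j = i + 1
--         while j < n and cigar[j] == cigar[i]:
--             j += 1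
--         ret.append((j - i, cigar[i].upper()))
--         i = j
--     return ret
-- ===== Notes on version B (the rewrite author's own statement) =====
-- stated objective: alternative
-- what changed: Replaces the last/count accumulator with transitions detected element-by-element by a two-pointer boundary scan: for each run start i, an inner scan advances j to the end of the maximal run and emits (j - i, char.upper()) at once.
import Mathlib
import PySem

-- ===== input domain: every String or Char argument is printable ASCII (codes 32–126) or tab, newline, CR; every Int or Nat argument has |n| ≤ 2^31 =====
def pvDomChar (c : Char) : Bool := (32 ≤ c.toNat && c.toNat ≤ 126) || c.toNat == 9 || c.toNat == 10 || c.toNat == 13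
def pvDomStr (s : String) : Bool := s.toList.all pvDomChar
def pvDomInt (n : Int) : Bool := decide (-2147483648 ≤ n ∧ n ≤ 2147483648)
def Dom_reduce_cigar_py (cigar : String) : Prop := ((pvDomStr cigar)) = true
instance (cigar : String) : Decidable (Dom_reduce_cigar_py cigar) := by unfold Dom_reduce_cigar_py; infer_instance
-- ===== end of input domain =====

-- B replaces A's last/count accumulator with a two-pointer boundary scan over each maximal run (alternative decomposition, same cost).

-- c.upper() for a one-character string c
def pvUp (c : Char) : String := String.ofList (PySem.Chars.upper [c])

-- ===== PORT A =====
-- loop body of A's for-loop: state (count, last, ret)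
def pvStepA (s : Int × Option Char × List (Int × String)) (op : Char) :
    Int × Option Char × List (Int × String) :=
  match s with
  | (count, last, ret) =>
    match last with
    | some l =>
      if op == l then (count + 1, some op, ret)
      else (1, some op, ret ++ [(count, pvUp l)])
    | none => (count, some op, ret)

-- the trailing 'if last: ret.append(...)'
def pvFinA (s : Int × Option Char × List (Int × String)) : List (Int × String) :=
  match s with
  | (count, some l, ret) => ret ++ [(count, pvUp l)]
  | (_, none, ret) => ret

def reduce_cigar_py (cigar : String) : List (Int × String) :=
  pvFinA (cigar.toList.foldl pvStepA (1, none, []))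

-- ===== PORT B =====
-- outer while: at each run start c, the inner while advances past the maximal run of c
def pvScanB : List Char → List (Int × String)
  | [] => []
  | c :: rest =>
    ((1 : Int) + (rest.takeWhile (fun d => d == c)).length, pvUp c)
      :: pvScanB (rest.dropWhile (fun d => d == c))
termination_by xs => xs.length
decreasing_by
  exact Nat.lt_succ_of_le (List.length_dropWhile_le _ _)

def reduce_cigar_py_alt (cigar : String) : List (Int × String) :=
  pvScanB cigar.toList

-- ===== PRECONDITION & SPEC =====
def Spec_reduce_cigar_py (cigar : String) (out : List (Int × String)) : Prop := out = reduce_cigar_py_alt cigar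
instance (cigar : String) (out : List (Int × String)) : Decidable (Spec_reduce_cigar_py cigar out) := by unfold Spec_reduce_cigar_py; infer_instance

-- ===== CLAIM (what is proved, stated in full; the proofs are below) =====
def Claim_equal_reduce_cigar_py : Prop := ∀ (cigar : String), Dom_reduce_cigar_py cigar → Spec_reduce_cigar_py cigar (reduce_cigar_py cigar)

-- ===== LEMMAS AND PROOFS =====

theorem pvScanB_nil : pvScanB [] = [] := by rw [pvScanB]

theorem pvScanB_cons (c : Char) (rest : List Char) :
    pvScanB (c :: rest) =
      ((1 : Int) + (rest.takeWhile (fun d => d == c)).length, pvUp c)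
        :: pvScanB (rest.dropWhile (fun d => d == c)) := by rw [pvScanB]

-- abstract run-length encoder carrying the pending run (l, k)
def pvAux (l : Char) (k : Int) : List Char → List (Int × String)
  | [] => [(k, pvUp l)]
  | c :: cs => if c == l then pvAux l (k + 1) cs else (k, pvUp l) :: pvAux c 1 cs

theorem pvFold_aux (xs : List Char) : ∀ (k : Int) (l : Char) (r : List (Int × String)),
    pvFinA (xs.foldl pvStepA (k, some l, r)) = r ++ pvAux l k xs := by
  induction xs with
  | nil => intro k l r; simp [pvFinA, pvAux]
  | cons c cs ih =>
    intro k l r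
    by_cases h : c = l
    · subst h
      simp [List.foldl, pvStepA, pvAux, ih]
    · have hb : (c == l) = false := by simp [h]
      simp [List.foldl, pvStepA, pvAux, hb, ih]

theorem pvAux_scan (xs : List Char) : ∀ (l : Char) (k : Int),
    pvAux l k xs = (k + (xs.takeWhile (fun d => d == l)).length, pvUp l)
      :: pvScanB (xs.dropWhile (fun d => d == l)) := by
  induction xs with
  | nil => intro l k; simp [pvAux, pvScanB_nil]
  | cons c cs ih =>
    intro l k
    by_cases h : c = l
    · subst h
      simp only [pvAux, beq_self_eq_true, if_true, List.takeWhile, List.dropWhile]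
      rw [ih]
      congr 1
      simp
      push_cast
      ring
    · have hb : (c == l) = false := by simp [h]
      simp only [pvAux, hb, List.takeWhile, List.dropWhile]
      rw [ih c 1, pvScanB_cons]
      simp

-- ===== VERDICT (by name: the statement is the Claim_ definition above) =====
theorem reduce_cigar_py_spec : Claim_equal_reduce_cigar_py := by
  intro cigar _
  unfold Spec_reduce_cigar_py reduce_cigar_py reduce_cigar_py_alt
  cases hxs : cigar.toList with
  | nil => simp [pvFinA, pvScanB_nil]
  | cons c cs =>
    have : pvFinA ((c :: cs).foldl pvStepA (1, none, [])) = pvAux c 1 cs := by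
      simpa using pvFold_aux cs 1 c []
    rw [this, pvAux_scan, pvScanB_cons]
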